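-- pv_equiv track=rewrite | github.com/hparik11/interview_questions | amazon_substring_with_k_distinct_char.py | uniqueSubstringSizeK
-- ===== SOURCE A (Python) =====
-- def uniqueSubstringSizeK(string, k):
--     substrings = set()
--     charHashMap = {}
--     i = 0
--     start = 0
--     while i < len(string):
--         currCh = string[i]
--
--         if currCh in charHashMap:
--             if charHashMap[currCh] >= start:
--                 start = charHashMap[currCh] + 1
--
--         charHashMap[currCh] = i
--
--         if i - start + 1 == k:
--             substrings.add(string[start: i + 1])
--             start += 1
--
--         i += 1
--
--     return substrings
-- ===== SOURCE B (Python) =====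
-- def uniqueSubstringSizeK(string, k):
--     if k <= 0:
--         return set()
--     result = set()
--     for i in range(len(string) - k + 1):
--         w = string[i:i + k]
--         if len(set(w)) == k:
--             result.add(w)
--     return result
-- ===== Notes on version B (the rewrite author's own statement) =====
-- stated objective: simpler
-- what changed: Replaced the stateful sliding-window scan (last-occurrence hashmap plus a moving start pointer) by a direct enumeration of every length-k window, adding a window iff its characters are pairwise distinct.
import Mathlib
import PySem

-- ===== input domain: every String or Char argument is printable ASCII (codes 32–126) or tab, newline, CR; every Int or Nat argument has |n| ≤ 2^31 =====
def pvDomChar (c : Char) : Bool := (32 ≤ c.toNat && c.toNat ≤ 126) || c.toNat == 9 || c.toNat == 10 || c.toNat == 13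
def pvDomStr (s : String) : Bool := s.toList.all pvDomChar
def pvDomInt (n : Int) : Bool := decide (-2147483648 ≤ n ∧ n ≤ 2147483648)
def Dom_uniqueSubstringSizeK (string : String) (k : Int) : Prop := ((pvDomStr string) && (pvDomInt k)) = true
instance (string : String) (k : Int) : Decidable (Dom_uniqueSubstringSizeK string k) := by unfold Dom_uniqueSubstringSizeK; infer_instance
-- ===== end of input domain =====

-- B replaces A's stateful sliding window (last-occurrence map + moving start pointer) by a
-- direct enumeration of every length-k window, keeping a window iff its characters are distinct
-- (simpler; same return value — both build the set in the same insertion order).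

-- ===== PORT A =====
-- A's while loop; `i` counts up to the length, `start`/`charHashMap` as in the Python.
-- `s.toList[i]` is exact for Python's `string[i]` because the guard gives `i < len(string)`.
def uALoop (s : String) (k : Int) (i : Nat) (start : Int)
    (m : PySem.Dict Char Int) (subs : PySem.Set String) : PySem.Set String :=
  if h : i < s.toList.length then
    let currCh := s.toList[i]
    let start1 : Int :=
      match m.get? currCh with
      | some v => if v ≥ start then v + 1 else start
      | none => start
    let m' := m.insert currCh (i : Int)
    if (i : Int) - start1 + 1 = k then
      uALoop s k (i + 1) (start1 + 1) m'
        (PySem.Set.add subs (PySem.Str.slice s (some start1) (some ((i : Int) + 1))))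
    else
      uALoop s k (i + 1) start1 m' subs
  else subs
termination_by s.toList.length - i
decreasing_by all_goals omega

def uniqueSubstringSizeK (string : String) (k : Int) : List String :=
  uALoop string k 0 0 PySem.Dict.empty PySem.Set.empty

-- ===== PORT B =====
def uniqueSubstringSizeK_alt (string : String) (k : Int) : List String :=
  if k ≤ 0 then PySem.Set.empty
  else
    (PySem.List.pyRange 0 (PySem.Str.len string - k + 1) 1).foldl
      (fun acc i =>
        let w := PySem.Str.slice string (some i) (some (i + k))
        if PySem.Set.len (PySem.Set.ofList w.toList) = k then PySem.Set.add acc w else acc)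
      PySem.Set.empty

-- ===== PRECONDITION & SPEC =====
def Spec_uniqueSubstringSizeK (string : String) (k : Int) (out : List String) : Prop := out = uniqueSubstringSizeK_alt string k
instance (string : String) (k : Int) (out : List String) : Decidable (Spec_uniqueSubstringSizeK string k out) := by unfold Spec_uniqueSubstringSizeK; infer_instance

-- ===== CLAIM (what is proved, stated in full; the proofs are below) =====
def Claim_equal_uniqueSubstringSizeK : Prop := ∀ (string : String) (k : Int), Dom_uniqueSubstringSizeK string k → Spec_uniqueSubstringSizeK string k (uniqueSubstringSizeK string k)

-- ===== LEMMAS AND PROOFS =====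

-- the window of `cs` from position `a` (inclusive) to `b` (exclusive)
def seg (cs : List Char) (a b : Nat) : List Char := (cs.take b).drop a

-- condition under which A's loop adds the window ending at index i (shown below):
-- k ≥ 1, the window fits, and its characters are pairwise distinct
def wCond (cs : List Char) (k : Int) (i : Nat) : Bool :=
  decide (1 ≤ k) && decide (k ≤ (i : Int) + 1) && decide (seg cs (((i : Int) + 1 - k).toNat) (i + 1)).Nodup

-- reference fold: scan ending indices i = 0,…,len-1, adding the window when wCond holds
def wFold (s : String) (k : Int) (i : Nat) (subs : List String) : List String :=
  if h : i < s.toList.length then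
    wFold s k (i + 1)
      (if wCond s.toList k i then
        PySem.Set.add subs (PySem.Str.slice s (some ((i : Int) + 1 - k)) (some ((i : Int) + 1)))
      else subs)
  else subs
termination_by s.toList.length - i
decreasing_by omega

-- invariant for A's charHashMap: it maps each seen char to its last occurrence before i
def MapInv (cs : List Char) (i : Nat) (m : PySem.Dict Char Int) : Prop :=
  ∀ c : Char,
    (m.get? c = none → c ∉ cs.take i) ∧
    (∀ v : Int, m.get? c = some v →
      ∃ j : Nat, v = (j : Int) ∧ j < i ∧ cs[j]? = some c ∧ c ∉ seg cs (j + 1) i)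

-- invariant for A's start pointer
def StartInv (cs : List Char) (k : Int) (i st : Nat) : Prop :=
  st ≤ i ∧ (seg cs st i).Nodup ∧
  (st = 0 ∨ (1 ≤ st ∧ ∃ c', cs[st - 1]? = some c' ∧ c' ∈ seg cs st i) ∨
    (1 ≤ k ∧ (st : Int) = (i : Int) - k + 1)) ∧
  (1 ≤ k → (i : Int) - (st : Int) ≤ k - 1)

lemma getElem?_seg (cs : List Char) (a b t : Nat) :
    (seg cs a b)[t]? = if a + t < b then cs[a + t]? else none := by
  simp [seg, List.getElem?_drop, List.getElem?_take]

lemma mem_seg_iff (cs : List Char) (a b : Nat) (c : Char) :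
    c ∈ seg cs a b ↔ ∃ j : Nat, a ≤ j ∧ j < b ∧ cs[j]? = some c := by
  rw [List.mem_iff_getElem?]
  constructor
  · rintro ⟨t, ht⟩
    rw [getElem?_seg] at ht
    split at ht
    · exact ⟨a + t, by omega, by omega, ht⟩
    · exact absurd ht (by simp)
  · rintro ⟨j, h1, h2, h3⟩
    refine ⟨j - a, ?_⟩
    rw [getElem?_seg]
    have : a + (j - a) = j := by omega
    rw [this, if_pos (by omega)]
    exact h3
lemma seg_snoc (cs : List Char) (a i : Nat) (hai : a ≤ i) (hi : i < cs.length) :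
    seg cs a (i + 1) = seg cs a i ++ [cs[i]] := by
  unfold seg
  rw [List.take_add_one, List.drop_append_of_le_length (by simp; omega)]
  congr 1
  simp [List.getElem?_eq_getElem hi]
lemma seg_self (cs : List Char) (a : Nat) : seg cs a a = [] := by
  apply List.eq_nil_of_length_eq_zero
  simp [seg]
lemma seg_drop (cs : List Char) (a a' b : Nat) (h : a ≤ a') :
    seg cs a' b = (seg cs a b).drop (a' - a) := by
  simp [seg, List.drop_drop]
  congr 1
  omega

lemma nodup_seg_mono (cs : List Char) (a a' b : Nat) (h : a ≤ a')
    (hnd : (seg cs a b).Nodup) : (seg cs a' b).Nodup := by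
  rw [seg_drop cs a a' b h]
  exact hnd.sublist (List.drop_sublist _ _)

lemma not_mem_seg_of_not_mem_take (cs : List Char) (a i : Nat) (c : Char)
    (h : c ∉ cs.take i) : c ∉ seg cs a i := fun hc => h (List.mem_of_mem_drop hc)

-- a duplicate value at two positions of a Nodup window is impossible
lemma nodup_seg_inj (cs : List Char) (a b p q : Nat) (hnd : (seg cs a b).Nodup)
    (hap : a ≤ p) (hpq : p < q) (hqb : q < b) (x : Char)
    (hp : cs[p]? = some x) (hq : cs[q]? = some x) : False := by
  rw [List.nodup_iff_getElem?_ne_getElem?] at hnd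
  have hqlen : q < cs.length := by
    by_contra h
    rw [List.getElem?_eq_none (by omega)] at hq
    exact absurd hq (by simp)
  have hlen : (seg cs a b).length = min b cs.length - a := by simp [seg]
  apply hnd (p - a) (q - a) (by omega) (by omega)
  rw [getElem?_seg, getElem?_seg]
  have e1 : a + (p - a) = p := by omega
  have e2 : a + (q - a) = q := by omega
  rw [e1, e2, if_pos (by omega), if_pos (by omega), hp, hq]
-- length of the full result of Set.ofList is the list's length iff the list has no duplicates
lemma ofList_length_lt_of_not_nodup (l : List Char) (h : ¬ l.Nodup) :
    (PySem.Set.ofList l).length < l.length := by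
  induction l with
  | nil => simp at h
  | cons x xs ih =>
    rw [PySem.Set.ofList_cons]
    by_cases hx : x ∈ xs
    · have hlt : ((PySem.Set.ofList xs).discard x).length < (PySem.Set.ofList xs).length := by
        apply List.length_filter_lt_length_iff_exists.2
        exact ⟨x, (PySem.Set.mem_ofList xs x).2 hx, by simp⟩
      have := PySem.Set.length_ofList_le xs
      simp only [List.length_cons]
      have hd : ((PySem.Set.ofList xs).discard x).length = (List.filter (fun y => !y == x) (PySem.Set.ofList xs)).length := rfl
      omega
    · have hxs : ¬ xs.Nodup := by
        intro hnd
        exact h (List.nodup_cons.2 ⟨hx, hnd⟩)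
      have h1 := ih hxs
      have h2 : ((PySem.Set.ofList xs).discard x).length ≤ (PySem.Set.ofList xs).length :=
        List.length_filter_le _ _
      simp only [List.length_cons]
      omega
lemma setLen_eq_iff_nodup (l : List Char) (K : Nat) (hK : l.length = K) :
    (PySem.Set.len (PySem.Set.ofList l) = (K : Int)) ↔ l.Nodup := by
  have hlen : PySem.Set.len (PySem.Set.ofList l) = ((PySem.Set.ofList l).length : Int) := rfl
  constructor
  · intro h
    by_contra hnd
    have := ofList_length_lt_of_not_nodup l hnd
    rw [hlen] at h
    omega
  · intro hnd
    rw [hlen, PySem.Set.ofList_eq_self_of_nodup l hnd, hK]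
-- ===== the step analysis for A's loop =====

-- the adjusted start pointer: its value as a Nat, and the facts the rest of the step needs
lemma adjust_spec (cs : List Char) (k : Int) (i st : Nat) (m : PySem.Dict Char Int)
    (hi : i < cs.length) (hS : StartInv cs k i st) (hM : MapInv cs i m) :
    ∃ st1 : Nat,
      ((match m.get? cs[i] with
        | some v => if v ≥ (st : Int) then v + 1 else (st : Int)
        | none => (st : Int)) = (st1 : Int)) ∧
      st ≤ st1 ∧ st1 ≤ i ∧ cs[i] ∉ seg cs st1 i ∧ (seg cs st1 (i + 1)).Nodup ∧
      (st1 = st ∨ (1 ≤ st1 ∧ cs[st1 - 1]? = some cs[i])) := by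
  obtain ⟨hsti, hnd, _, _⟩ := hS
  have hnodup_of : ∀ st1 : Nat, st ≤ st1 → st1 ≤ i → cs[i] ∉ seg cs st1 i →
      (seg cs st1 (i + 1)).Nodup := by
    intro st1 hle hle2 hnm
    rw [seg_snoc cs st1 i hle2 hi]
    simp [List.nodup_append, nodup_seg_mono cs st st1 i hle hnd]
    exact fun a ha hEq => hnm (hEq ▸ ha)
  rcases hv : m.get? cs[i] with _ | v
  · -- not in map: no occurrence in take i at all
    have hnm := (hM cs[i]).1 hv
    refine ⟨st, by simp, Nat.le_refl st, hsti, ?_, ?_, Or.inl rfl⟩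
    · exact not_mem_seg_of_not_mem_take cs st i _ hnm
    · exact hnodup_of st (Nat.le_refl st) hsti (not_mem_seg_of_not_mem_take cs st i _ hnm)
  · obtain ⟨j, hvj, hji, hcj, hnotin⟩ := (hM cs[i]).2 v hv
    by_cases hge : v ≥ (st : Int)
    · -- adjusted to j+1
      have hstj : st ≤ j := by omega
      have hmatch : (match some v with
          | some v => if v ≥ (st : Int) then v + 1 else (st : Int)
          | none => (st : Int)) = ((j + 1 : Nat) : Int) := by
        subst hvj
        show (if ((j : Int)) ≥ (st : Int) then ((j : Int)) + 1 else (st : Int)) = ((j + 1 : Nat) : Int)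
        rw [if_pos (by omega : ((j : Int)) ≥ (st : Int))]
        push_cast; ring
      refine ⟨j + 1, hmatch, by omega, by omega, hnotin,
        hnodup_of (j + 1) (by omega) (by omega) hnotin, Or.inr ⟨by omega, by simpa using hcj⟩⟩
    · -- last occurrence before start: char not in current window
      have hjst : j < st := by omega
      have hnm : cs[i] ∉ seg cs st i := by
        intro hmem
        apply hnotin
        rw [mem_seg_iff] at hmem ⊢
        obtain ⟨q, hq1, hq2, hq3⟩ := hmem
        exact ⟨q, by omega, hq2, hq3⟩
      have hmatch : (match some v with
          | some v => if v ≥ (st : Int) then v + 1 else (st : Int)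
          | none => (st : Int)) = ((st : Nat) : Int) := by
        subst hvj
        show (if ((j : Int)) ≥ (st : Int) then ((j : Int)) + 1 else (st : Int)) = ((st : Nat) : Int)
        rw [if_neg (by omega : ¬ ((j : Int)) ≥ (st : Int))]
      refine ⟨st, hmatch, Nat.le_refl st, hsti, hnm,
        hnodup_of st (Nat.le_refl st) hsti hnm, Or.inl rfl⟩
-- A's add fires exactly when the window ending at i exists and is distinct
lemma fire_iff (cs : List Char) (k : Int) (i st st1 : Nat)
    (hi : i < cs.length) (hS : StartInv cs k i st)
    (h1 : st ≤ st1) (h2 : st1 ≤ i) (hnd : (seg cs st1 (i + 1)).Nodup)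
    (hE : st1 = st ∨ (1 ≤ st1 ∧ cs[st1 - 1]? = some cs[i])) :
    ((i : Int) - (st1 : Int) + 1 = k) ↔ wCond cs k i = true := by
  obtain ⟨hsti, hndst, hmin, he⟩ := hS
  unfold wCond
  simp only [Bool.and_eq_true, decide_eq_true_eq]
  constructor
  · intro hf
    have hk1 : 1 ≤ k := by omega
    have htn : ((i : Int) + 1 - k).toNat = st1 := by omega
    exact ⟨⟨hk1, by omega⟩, by rw [htn]; exact hnd⟩
  · rintro ⟨⟨hk1, hki⟩, hndw⟩
    set j : Nat := ((i : Int) + 1 - k).toNat with hj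
    have hjle : j ≤ i := by omega
    have hjint : (j : Int) = (i : Int) + 1 - k := by omega
    -- st1 ≥ j from the length bound (e)
    have hge : j ≤ st1 := by
      have := he hk1
      omega
    -- st1 ≤ j by the minimality clause
    have hle : st1 ≤ j := by
      by_contra hgt
      rw [Nat.not_le] at hgt
      rcases hE with rfl | ⟨hpos, hdup⟩
      · rcases hmin with rfl | ⟨hpos, c', hc', hmem⟩ | ⟨_, heq⟩
        · omega
        · rw [mem_seg_iff] at hmem
          obtain ⟨q, hq1, hq2, hq3⟩ := hmem
          exact nodup_seg_inj cs j (i + 1) (st1 - 1) q hndw (by omega) (by omega)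
            (by omega) c' (by simpa using hc') hq3
        · omega
      · exact nodup_seg_inj cs j (i + 1) (st1 - 1) i hndw (by omega) (by omega)
          (by omega) cs[i] hdup (by simp [hi])
    omega
lemma StartInv_next_nofire (cs : List Char) (k : Int) (i st st1 : Nat)
    (hi : i < cs.length) (hS : StartInv cs k i st)
    (h1 : st ≤ st1) (h2 : st1 ≤ i) (hnd : (seg cs st1 (i + 1)).Nodup)
    (hE : st1 = st ∨ (1 ≤ st1 ∧ cs[st1 - 1]? = some cs[i]))
    (hnf : (i : Int) - (st1 : Int) + 1 ≠ k) : StartInv cs k (i + 1) st1 := by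
  obtain ⟨hsti, hndst, hmin, he⟩ := hS
  refine ⟨by omega, hnd, ?_, ?_⟩
  · rcases hE with rfl | ⟨hpos, hdup⟩
    · rcases hmin with rfl | ⟨hpos, c', hc', hmem⟩ | ⟨hk1, heq⟩
      · exact Or.inl rfl
      · refine Or.inr (Or.inl ⟨hpos, c', hc', ?_⟩)
        rw [seg_snoc cs st1 i h2 hi]
        exact List.mem_append_left _ hmem
      · exact absurd (by omega : (i : Int) - (st1 : Int) + 1 = k) hnf
    · refine Or.inr (Or.inl ⟨hpos, cs[i], hdup, ?_⟩)
      rw [seg_snoc cs st1 i h2 hi]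
      simp
  · intro hk1
    have := he hk1
    omega
lemma StartInv_next_fire (cs : List Char) (k : Int) (i st1 : Nat)
    (h2 : st1 ≤ i) (hnd : (seg cs st1 (i + 1)).Nodup)
    (hf : (i : Int) - (st1 : Int) + 1 = k) : StartInv cs k (i + 1) (st1 + 1) := by
  refine ⟨by omega, nodup_seg_mono cs st1 (st1 + 1) (i + 1) (by omega) hnd, ?_, by omega⟩
  exact Or.inr (Or.inr ⟨by omega, by omega⟩)
lemma MapInv_next (cs : List Char) (i : Nat) (m : PySem.Dict Char Int)
    (hi : i < cs.length) (hM : MapInv cs i m) :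
    MapInv cs (i + 1) (m.insert cs[i] (i : Int)) := by
  intro c
  by_cases hc : c = cs[i]
  · subst hc
    constructor
    · intro hnone
      rw [PySem.Dict.get?_insert_self] at hnone
      exact absurd hnone (by simp)
    · intro v hv
      rw [PySem.Dict.get?_insert_self] at hv
      refine ⟨i, by simpa using hv.symm, by omega, by simp [hi], ?_⟩
      rw [seg_self]
      simp
  · constructor
    · intro hnone
      rw [PySem.Dict.get?_insert_of_ne _ _ hc] at hnone
      have := (hM c).1 hnone
      rw [List.take_add_one]
      intro hmem
      rcases List.mem_append.1 hmem with h | h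
      · exact this h
      · simp [hi] at h
        exact hc h
    · intro v hv
      rw [PySem.Dict.get?_insert_of_ne _ _ hc] at hv
      obtain ⟨j, hvj, hji, hcj, hnotin⟩ := (hM c).2 v hv
      refine ⟨j, hvj, by omega, hcj, ?_⟩
      rw [seg_snoc cs (j + 1) i (by omega) hi]
      intro hmem
      rcases List.mem_append.1 hmem with h | h
      · exact hnotin h
      · simp at h
        exact hc h
-- ===== A's loop equals the reference fold =====
lemma loop_eq_aux (s : String) (k : Int) (fuel : Nat) :
    ∀ (i st : Nat) (m : PySem.Dict Char Int) (subs : List String),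
      s.toList.length - i = fuel → StartInv s.toList k i st → MapInv s.toList i m →
      uALoop s k i (st : Int) m subs = wFold s k i subs := by
  induction fuel with
  | zero =>
    intro i st m subs hf _ _
    rw [uALoop, wFold, dif_neg (by omega), dif_neg (by omega)]
  | succ f ih =>
    intro i st m subs hf hS hM
    have hi : i < s.toList.length := by omega
    obtain ⟨st1, hmatch, h1, h2, hnm, hnd, hE⟩ := adjust_spec s.toList k i st m hi hS hM
    have hMn := MapInv_next s.toList i m hi hM
    rw [uALoop, wFold, dif_pos hi, dif_pos hi]
    simp only [hmatch]
    by_cases hfire : (i : Int) - (st1 : Int) + 1 = k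
    · rw [if_pos hfire, if_pos ((fire_iff s.toList k i st st1 hi hS h1 h2 hnd hE).1 hfire)]
      have e1 : ((st1 : Int)) = (i : Int) + 1 - k := by omega
      have e2 : ((st1 : Int)) + 1 = ((st1 + 1 : Nat) : Int) := by push_cast; ring
      rw [e1] at *
      rw [e2]
      exact ih (i + 1) (st1 + 1) _ _ (by omega)
        (StartInv_next_fire s.toList k i st1 h2 hnd (by omega))
        hMn
    · rw [if_neg hfire,
        if_neg (fun hw => hfire ((fire_iff s.toList k i st st1 hi hS h1 h2 hnd hE).2 hw))]
      exact ih (i + 1) st1 _ _ (by omega)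
        (StartInv_next_nofire s.toList k i st st1 hi hS h1 h2 hnd hE hfire) hMn
-- ===== the reference fold equals B =====
lemma foldl_skip {α β : Type} (l : List α) (f : β → α → β) (acc : β)
    (h : ∀ acc' x, x ∈ l → f acc' x = acc') : l.foldl f acc = acc := by
  rw [PySem.List.foldl_congr_mem l f (fun a _ => a) acc (fun a x hx => h a x hx)]
  exact List.foldl_fixed l

lemma wFold_eq_foldl (s : String) (k : Int) :
    ∀ (fuel i : Nat) (subs : List String), s.toList.length - i = fuel →
      wFold s k i subs = (List.range' i fuel).foldl
        (fun acc t =>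
          if wCond s.toList k t then
            PySem.Set.add acc (PySem.Str.slice s (some ((t : Int) + 1 - k)) (some ((t : Int) + 1)))
          else acc) subs := by
  intro fuel
  induction fuel with
  | zero => intro i subs hf; rw [wFold, dif_neg (by omega)]; rfl
  | succ f ih =>
    intro i subs hf
    rw [wFold, dif_pos (by omega : i < s.toList.length), List.range'_succ, List.foldl_cons]
    exact ih (i + 1) _ (by omega)
-- B's fold over nat start indices
def stepB (s : String) (k : Int) (acc : List String) (j : Nat) : List String :=
  if PySem.Set.len (PySem.Set.ofList (PySem.Str.slice s (some (j : Int)) (some ((j : Int) + k))).toList) = k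
  then PySem.Set.add acc (PySem.Str.slice s (some (j : Int)) (some ((j : Int) + k))) else acc

lemma alt_eq_foldBn (s : String) (k : Int) (hk : ¬ k ≤ 0) :
    uniqueSubstringSizeK_alt s k
      = (List.range ((s.toList.length : Int) - k + 1).toNat).foldl (stepB s k) [] := by
  rw [uniqueSubstringSizeK_alt, if_neg hk]
  rw [PySem.Str.len_eq, PySem.List.pyRange_one, List.foldl_map]
  simp only [zero_add, sub_zero]
  rfl

lemma step_eq (s : String) (k : Int) (K : Nat) (hK : k = (K : Int)) (hK1 : 1 ≤ K)
    (a : Nat) (han : a + K ≤ s.toList.length) (acc : List String) :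
    (if wCond s.toList k (a + (K - 1)) then
      PySem.Set.add acc (PySem.Str.slice s (some (((a + (K - 1) : Nat) : Int) + 1 - k))
        (some (((a + (K - 1) : Nat) : Int) + 1)))
    else acc) = stepB s k acc a := by
  have ht1 : ((a + (K - 1) : Nat) : Int) + 1 - k = (a : Int) := by omega
  have ht2 : ((a + (K - 1) : Nat) : Int) + 1 = (a : Int) + k := by omega
  have hw : (PySem.Str.slice s (some ((a : Int))) (some ((a : Int) + k))).toList
      = seg s.toList a (a + K) := by
    rw [PySem.Str.toList_slice, PySem.Chars.slice_eq_listSlice]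
    have e : (a : Int) + k = ((a + K : Nat) : Int) := by omega
    rw [e, PySem.List.slice_natCast]
    unfold seg
    rw [List.drop_take]
  have hlen : (seg s.toList a (a + K)).length = K := by
    simp only [seg, List.length_drop, List.length_take]
    omega
  have hcond : (PySem.Set.len (PySem.Set.ofList
      (PySem.Str.slice s (some ((a : Int))) (some ((a : Int) + k))).toList) = k)
      ↔ (seg s.toList a (a + K)).Nodup := by
    rw [hw, hK]
    exact setLen_eq_iff_nodup _ K hlen
  have hwc : wCond s.toList k (a + (K - 1)) = decide ((seg s.toList a (a + K)).Nodup) := by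
    unfold wCond
    have e1 : (((a + (K - 1) : Nat) : Int) + 1 - k).toNat = a := by omega
    have e2 : a + (K - 1) + 1 = a + K := by omega
    have hb1 : decide (1 ≤ k) = true := decide_eq_true (by omega)
    have hb2 : decide (k ≤ ((a + (K - 1) : Nat) : Int) + 1) = true := decide_eq_true (by omega)
    rw [e1, e2, hb1, hb2, Bool.true_and, Bool.true_and]
  rw [ht1, ht2, hwc]
  unfold stepB
  by_cases hnd : (seg s.toList a (a + K)).Nodup
  · rw [if_pos (by simpa using hnd), if_pos (hcond.2 hnd)]
  · rw [if_neg (by simpa using hnd), if_neg (fun hc => hnd (hcond.1 hc))]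

lemma shift (s : String) (k : Int) (K : Nat) (hK : k = (K : Int)) (hK1 : 1 ≤ K) :
    ∀ (r a : Nat) (acc : List String), a + r + K ≤ s.toList.length + 1 →
      (List.range' (a + (K - 1)) r).foldl
        (fun acc t =>
          if wCond s.toList k t then
            PySem.Set.add acc (PySem.Str.slice s (some ((t : Int) + 1 - k)) (some ((t : Int) + 1)))
          else acc) acc
      = (List.range' a r).foldl (stepB s k) acc := by
  intro r
  induction r with
  | zero => intro a acc _; rfl
  | succ rr ih =>
    intro a acc hle
    rw [List.range'_succ, List.range'_succ, List.foldl_cons, List.foldl_cons]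
    rw [step_eq s k K hK hK1 a (by omega) acc]
    have : a + (K - 1) + 1 = (a + 1) + (K - 1) := by omega
    rw [this]
    exact ih (a + 1) _ (by omega)

lemma wFold_eq_alt (s : String) (k : Int) :
    wFold s k 0 [] = uniqueSubstringSizeK_alt s k := by
  set n := s.toList.length with hn
  rw [wFold_eq_foldl s k n 0 [] (by omega)]
  by_cases hk : k ≤ 0
  · rw [uniqueSubstringSizeK_alt, if_pos hk]
    apply foldl_skip
    intro acc' t _
    rw [if_neg]
    unfold wCond
    simp only [Bool.and_eq_true, decide_eq_true_eq]
    rintro ⟨⟨h1, _⟩, _⟩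
    omega
  · set K := k.toNat with hKdef
    have hKk : k = (K : Int) := by omega
    have hK1 : 1 ≤ K := by omega
    rw [alt_eq_foldBn s k hk]
    by_cases hKn : K ≤ n
    · have hM : ((n : Int) - k + 1).toNat = n + 1 - K := by omega
      rw [hM]
      have hsplit : List.range' 0 n = List.range' 0 (K - 1) ++ List.range' (K - 1) (n + 1 - K) := by
        have := @List.range'_append 0 (K - 1) (n + 1 - K) 1
        simp only [Nat.zero_add, Nat.one_mul] at this
        rw [this]
        congr 1
        omega
      rw [hsplit, List.foldl_append]
      have hskip : (List.range' 0 (K - 1)).foldl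
          (fun acc t =>
            if wCond s.toList k t then
              PySem.Set.add acc (PySem.Str.slice s (some ((t : Int) + 1 - k)) (some ((t : Int) + 1)))
            else acc) [] = ([] : List String) := by
        apply foldl_skip
        intro acc' t ht
        have htlt : t < K - 1 := by
          have := List.mem_range'_1.1 ht
          omega
        rw [if_neg]
        unfold wCond
        simp only [Bool.and_eq_true, decide_eq_true_eq]
        rintro ⟨⟨h1, h2⟩, _⟩
        omega
      rw [hskip]
      have hsh := shift s k K hKk hK1 (n + 1 - K) 0 [] (by omega)
      simp only [Nat.zero_add] at hsh
      rw [hsh, List.range_eq_range']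
    · have hM : ((n : Int) - k + 1).toNat = 0 := by omega
      rw [hM]
      simp only [List.range_zero, List.foldl_nil]
      apply foldl_skip
      intro acc' t ht
      have htlt : t < n := by
        have := List.mem_range'_1.1 ht
        omega
      rw [if_neg]
      unfold wCond
      simp only [Bool.and_eq_true, decide_eq_true_eq]
      rintro ⟨⟨h1, h2⟩, _⟩
      omega
-- ===== VERDICT (by name: the statement is the Claim_ definition above) =====
theorem uniqueSubstringSizeK_spec : Claim_equal_uniqueSubstringSizeK := by
  intro s k _
  unfold Spec_uniqueSubstringSizeK uniqueSubstringSizeK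
  have h0 : uALoop s k 0 ((0 : Nat) : Int) PySem.Dict.empty PySem.Set.empty = wFold s k 0 [] := by
    apply loop_eq_aux s k (s.toList.length - 0) 0 0 _ _ rfl
    · refine ⟨Nat.le_refl 0, by simp [seg], Or.inl rfl, ?_⟩
      intro hk; simpa using hk
    · intro c
      constructor
      · intro _; simp
      · intro v hv; simp [PySem.Dict.get?_empty] at hv
  simpa using h0.trans (wFold_eq_alt s k)
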